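-- pv_equiv track=rewrite | github.com/PaddlePaddle/PaddleNLP | paddlenlp/datasets/cblue.py | _search_entity_index
-- ===== SOURCE A (Python) =====
-- def _search_entity_index(tokens, entity_tokens, skip_idx=None):
--     ent_len = len(entity_tokens)
--     for idx in range(len(tokens) - ent_len + 1):
--         if tokens[idx:idx + ent_len] == entity_tokens:
--             if skip_idx is None:
--                 return idx
--             elif idx < skip_idx[0] or idx > skip_idx[1]:
--                 return idx
--     return None
-- ===== SOURCE B (Python) =====
-- def _search_entity_index(tokens, entity_tokens, skip_idx=None):
--     # Rabin-Karp-style search: cheap additive fingerprints via prefix sums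
--     # filter out almost all candidate positions before the full comparison.
--     m = len(entity_tokens)
--     prefix = [0]
--     for t in tokens:
--         prefix.append(prefix[-1] + sum(map(ord, t)))
--     target = sum(sum(map(ord, t)) for t in entity_tokens)
--     for idx in range(len(tokens) - m + 1):
--         if prefix[idx + m] - prefix[idx] == target and tokens[idx:idx + m] == entity_tokens:
--             if skip_idx is None or not (skip_idx[0] <= idx <= skip_idx[1]):
--                 return idx
--     return None
-- ===== Notes on version B (the rewrite author's own statement) =====
-- stated objective: alternative
-- what changed: B is a Rabin-Karp-style search: it precomputes additive token fingerprints and their prefix sums so each window is first screened by an O(1) fingerprint comparison and the full token-by-token window comparison only runs on fingerprint hits.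
import Mathlib
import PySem

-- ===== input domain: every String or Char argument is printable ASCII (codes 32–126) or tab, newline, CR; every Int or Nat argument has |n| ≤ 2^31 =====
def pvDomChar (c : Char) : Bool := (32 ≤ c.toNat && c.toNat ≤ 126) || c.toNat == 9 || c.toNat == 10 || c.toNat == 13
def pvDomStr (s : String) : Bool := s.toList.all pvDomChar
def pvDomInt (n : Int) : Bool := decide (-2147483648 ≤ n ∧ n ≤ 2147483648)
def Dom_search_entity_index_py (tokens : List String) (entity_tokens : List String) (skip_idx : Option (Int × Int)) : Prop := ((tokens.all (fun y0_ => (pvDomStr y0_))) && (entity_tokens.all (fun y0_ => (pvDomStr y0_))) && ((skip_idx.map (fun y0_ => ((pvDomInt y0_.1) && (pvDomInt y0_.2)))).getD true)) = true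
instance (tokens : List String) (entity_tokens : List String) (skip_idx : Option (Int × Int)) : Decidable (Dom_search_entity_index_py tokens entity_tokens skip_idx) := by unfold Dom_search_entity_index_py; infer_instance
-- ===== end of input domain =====

-- B is a Rabin-Karp-style search: additive token fingerprints with prefix sums
-- screen each window in O(1) before the full window comparison (objective: alternative).

-- ===== PORT A =====
-- forward loop with early return over range(len(tokens) - ent_len + 1)
def searchLoopA (tokens entity_tokens : List String) (skip_idx : Option (Int × Int)) : List Int → Option Int
  | [] => none
  | idx :: rest =>
    if PySem.List.slice tokens (some idx) (some (idx + (entity_tokens.length : Int))) = entity_tokens then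
      match skip_idx with
      | none => some idx
      | some s => if idx < s.1 ∨ idx > s.2 then some idx else searchLoopA tokens entity_tokens skip_idx rest
    else searchLoopA tokens entity_tokens skip_idx rest

def search_entity_index_py (tokens : List String) (entity_tokens : List String) (skip_idx : Option (Int × Int)) : Option Int :=
  searchLoopA tokens entity_tokens skip_idx
    (PySem.List.pyRange 0 ((tokens.length : Int) - (entity_tokens.length : Int) + 1) 1)

-- ===== PORT B =====
-- sum(map(ord, t))
def tokHash (t : String) : Int := (t.toList.map (fun c => (c.toNat : Int))).sum

-- prefix = [0]; for t in tokens: prefix.append(prefix[-1] + sum(map(ord, t)))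
def buildPrefix (tokens : List String) : List Int :=
  tokens.foldl (fun acc t => acc ++ [acc.getLast! + tokHash t]) [0]

-- prefix[i]; every index B uses is in range, where pyGet?/getD 0 is Python's prefix[i]
def prefAt (pre : List Int) (i : Int) : Int := (PySem.List.pyGet? pre i).getD 0

-- the search loop of B: fingerprint screen, then full window comparison, then skip test
def searchLoopB (tokens entity_tokens : List String) (pre : List Int) (target : Int)
    (skip_idx : Option (Int × Int)) : List Int → Option Int
  | [] => none
  | idx :: rest =>
    if (prefAt pre (idx + (entity_tokens.length : Int)) - prefAt pre idx == target) &&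
       (PySem.List.slice tokens (some idx) (some (idx + (entity_tokens.length : Int))) == entity_tokens) then
      if (match skip_idx with
          | none => true
          | some s => !(decide (s.1 ≤ idx) && decide (idx ≤ s.2))) then some idx
      else searchLoopB tokens entity_tokens pre target skip_idx rest
    else searchLoopB tokens entity_tokens pre target skip_idx rest

def search_entity_index_py_alt (tokens : List String) (entity_tokens : List String) (skip_idx : Option (Int × Int)) : Option Int :=
  searchLoopB tokens entity_tokens (buildPrefix tokens) ((entity_tokens.map tokHash).sum) skip_idx
    (PySem.List.pyRange 0 ((tokens.length : Int) - (entity_tokens.length : Int) + 1) 1)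

-- ===== PRECONDITION & SPEC =====
def Spec_search_entity_index_py (tokens : List String) (entity_tokens : List String) (skip_idx : Option (Int × Int)) (out : Option Int) : Prop := out = search_entity_index_py_alt tokens entity_tokens skip_idx
instance (tokens : List String) (entity_tokens : List String) (skip_idx : Option (Int × Int)) (out : Option Int) : Decidable (Spec_search_entity_index_py tokens entity_tokens skip_idx out) := by unfold Spec_search_entity_index_py; infer_instance

-- ===== CLAIM (what is proved, stated in full; the proofs are below) =====
def Claim_equal_search_entity_index_py : Prop := ∀ (tokens : List String) (entity_tokens : List String) (skip_idx : Option (Int × Int)), Dom_search_entity_index_py tokens entity_tokens skip_idx → Spec_search_entity_index_py tokens entity_tokens skip_idx (search_entity_index_py tokens entity_tokens skip_idx)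

-- ===== LEMMAS AND PROOFS =====

-- A's per-index condition
def condA (tokens entity_tokens : List String) (skip_idx : Option (Int × Int)) (idx : Int) : Bool :=
  (decide (PySem.List.slice tokens (some idx) (some (idx + (entity_tokens.length : Int))) = entity_tokens)) &&
    (match skip_idx with
     | none => true
     | some s => decide (idx < s.1 ∨ idx > s.2))

-- B's per-index condition
def condB (tokens entity_tokens : List String) (pre : List Int) (target : Int)
    (skip_idx : Option (Int × Int)) (idx : Int) : Bool :=
  ((prefAt pre (idx + (entity_tokens.length : Int)) - prefAt pre idx == target) &&
   (PySem.List.slice tokens (some idx) (some (idx + (entity_tokens.length : Int))) == entity_tokens)) &&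
    (match skip_idx with
     | none => true
     | some s => !(decide (s.1 ≤ idx) && decide (idx ≤ s.2)))

theorem searchLoopA_eq_find? (tokens entity_tokens : List String) (skip_idx : Option (Int × Int)) (l : List Int) :
    searchLoopA tokens entity_tokens skip_idx l = l.find? (condA tokens entity_tokens skip_idx) := by
  induction l with
  | nil => rfl
  | cons idx rest ih =>
    simp only [searchLoopA, List.find?, condA]
    by_cases hm : PySem.List.slice tokens (some idx) (some (idx + (entity_tokens.length : Int))) = entity_tokens
    · cases skip_idx with
      | none => simp [hm]
      | some s =>
        by_cases hs : idx < s.1 ∨ idx > s.2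
        · simp [hm, hs]
        · simp [hm, hs, ih]
    · simp [hm, ih]

theorem searchLoopB_eq_find? (tokens entity_tokens : List String) (pre : List Int) (target : Int)
    (skip_idx : Option (Int × Int)) (l : List Int) :
    searchLoopB tokens entity_tokens pre target skip_idx l
      = l.find? (condB tokens entity_tokens pre target skip_idx) := by
  induction l with
  | nil => rfl
  | cons idx rest ih =>
    simp only [searchLoopB, List.find?, condB]
    by_cases hm : ((prefAt pre (idx + (entity_tokens.length : Int)) - prefAt pre idx == target) &&
        (PySem.List.slice tokens (some idx) (some (idx + (entity_tokens.length : Int))) == entity_tokens)) = true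
    · cases skip_idx with
      | none => simp [hm]
      | some s =>
        by_cases h1 : s.1 ≤ idx <;> by_cases h2 : idx ≤ s.2 <;> simp [hm, h1, h2, ih]
    · simp [hm, ih]

theorem find?_congr_mem (p q : Int → Bool) (l : List Int) (h : ∀ x ∈ l, p x = q x) :
    l.find? p = l.find? q := by
  induction l with
  | nil => rfl
  | cons x xs ih =>
    simp only [List.find?]
    rw [h x (List.mem_cons_self), ih (fun y hy => h y (List.mem_cons_of_mem _ hy))]

-- the foldl building the prefix list, characterised: tailSums a l = running sums starting at a
def tailSums (a : Int) : List String → List Int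
  | [] => []
  | t :: rest => (a + tokHash t) :: tailSums (a + tokHash t) rest

theorem foldl_prefix_eq (l : List String) (acc : List Int) (hacc : acc ≠ []) :
    l.foldl (fun acc t => acc ++ [acc.getLast! + tokHash t]) acc
      = acc ++ tailSums (acc.getLast! ) l := by
  induction l generalizing acc with
  | nil => simp [tailSums]
  | cons t rest ih =>
    rw [List.foldl_cons, ih _ (by simp), tailSums]
    simp [List.getLast!_eq_getLast?_getD, List.append_assoc]

theorem buildPrefix_eq (tokens : List String) :
    buildPrefix tokens = 0 :: tailSums 0 tokens := by
  unfold buildPrefix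
  rw [foldl_prefix_eq _ _ (by simp)]
  simp [List.getLast!_eq_getLast?_getD]

theorem tailSums_getElem? (l : List String) (a : Int) (j : Nat) (hj : j < l.length) :
    (tailSums a l)[j]? = some (a + ((l.take (j + 1)).map tokHash).sum) := by
  induction l generalizing a j with
  | nil => simp at hj
  | cons t rest ih =>
    cases j with
    | zero => simp [tailSums]
    | succ k =>
      simp only [tailSums, List.getElem?_cons_succ]
      rw [ih _ k (by simpa using hj)]
      simp [List.take_succ_cons, add_assoc]

theorem prefAt_eq (tokens : List String) (k : Nat) (hk : k ≤ tokens.length) :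
    prefAt (buildPrefix tokens) (k : Int) = ((tokens.take k).map tokHash).sum := by
  unfold prefAt
  rw [PySem.List.pyGet?_natCast, buildPrefix_eq]
  cases k with
  | zero => simp
  | succ j =>
    simp only [List.getElem?_cons_succ]
    rw [tailSums_getElem? _ _ j (by omega)]
    simp

-- a true window comparison forces the fingerprint screen to pass
theorem fp_of_slice (tokens entity_tokens : List String) (i : Nat)
    (hfit : i + entity_tokens.length ≤ tokens.length)
    (hm : PySem.List.slice tokens (some (i : Int)) (some ((i : Int) + (entity_tokens.length : Int))) = entity_tokens) :
    prefAt (buildPrefix tokens) ((i : Int) + (entity_tokens.length : Int)) - prefAt (buildPrefix tokens) (i : Int)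
      = (entity_tokens.map tokHash).sum := by
  rw [PySem.List.slice_toNat _ (by positivity) (by positivity)] at hm
  have htn : (((i : Int) + (entity_tokens.length : Int)).toNat) = i + entity_tokens.length := by omega
  simp only [htn, Int.toNat_natCast, Nat.add_sub_cancel_left] at hm
  have hc : (i : Int) + (entity_tokens.length : Int) = ((i + entity_tokens.length : Nat) : Int) := by
    push_cast; ring
  rw [hc, prefAt_eq _ _ hfit, prefAt_eq _ _ (by omega)]
  rw [List.take_add, List.map_append, List.sum_append, hm]
  omega

-- the two per-index conditions agree on every nonnegative index
theorem cond_eq (tokens entity_tokens : List String) (skip_idx : Option (Int × Int)) (idx : Int)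
    (h0 : 0 ≤ idx) (hub : idx < (tokens.length : Int) - (entity_tokens.length : Int) + 1) :
    condA tokens entity_tokens skip_idx idx
      = condB tokens entity_tokens (buildPrefix tokens) ((entity_tokens.map tokHash).sum) skip_idx idx := by
  unfold condA condB
  have hskip : (match skip_idx with
       | none => true
       | some s => decide (idx < s.1 ∨ idx > s.2))
      = (match skip_idx with
         | none => true
         | some s => !(decide (s.1 ≤ idx) && decide (idx ≤ s.2))) := by
    cases skip_idx with
    | none => rfl
    | some s =>
      simp only [Bool.not_and, ← decide_not]
      apply Bool.coe_iff_coe.mp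
      simp only [decide_eq_true_eq, Bool.or_eq_true, decide_eq_true_eq]
      omega
  rw [← hskip]
  congr 1
  obtain ⟨i, rfl⟩ := Int.eq_ofNat_of_zero_le h0
  have hfit : i + entity_tokens.length ≤ tokens.length := by omega
  by_cases hm : PySem.List.slice tokens (some (i : Int)) (some ((i : Int) + (entity_tokens.length : Int))) = entity_tokens
  · simp [hm, fp_of_slice tokens entity_tokens i hfit hm]
  · simp [hm]

-- ===== VERDICT (by name: the statement is the Claim_ definition above) =====
theorem search_entity_index_py_spec : Claim_equal_search_entity_index_py := by
  intro tokens entity_tokens skip_idx _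
  unfold Spec_search_entity_index_py search_entity_index_py search_entity_index_py_alt
  rw [searchLoopA_eq_find?, searchLoopB_eq_find?]
  apply find?_congr_mem
  intro idx hidx
  have h := PySem.List.mem_pyRange_one.mp hidx
  exact cond_eq tokens entity_tokens skip_idx idx h.1 h.2
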